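-- pv_equiv track=rewrite | github.com/PiyushJ1/2026-recruitment-technical-assessment | backend/py_template/devdonalds.py | parse_handwriting
-- ===== SOURCE A (Python) =====
-- from typing import List, Dict, Union
--
-- def parse_handwriting(recipeName: str) -> Union[str | None]:
--     if len(recipeName) == 0:
--         return None
--
--     parsedRecipeName = ""
--
--     # loop through and only add alphabets/whitespaces to new string
--     for char in recipeName:
--         if char.isalpha() or char == " ":
--             parsedRecipeName += char
--         if char == "_" or char == "-":  # replace '_' and '-' with " "
--             parsedRecipeName += " "
--
--     final = ""
--
--     # capitalise each word in new string
--     for word in parsedRecipeName.split():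
--         final += word.capitalize() + " "
--
--     final = final.strip()  # remove leading/trailing whitespaces
--
--     if len(final) == 0:
--         return None
--
--     return final
-- ===== SOURCE B (Python) =====
-- def parse_handwriting(recipeName):
--     words = []
--     buf = []
--     for ch in recipeName:
--         if ch.isalpha():
--             buf.append(ch)
--         elif ch in " _-":
--             if buf:
--                 words.append(''.join(buf).capitalize())
--                 buf = []
--         # any other character is ignored and does not split the word
--     if buf:
--         words.append(''.join(buf).capitalize())
--     if not words:
--         return None
--     return ' '.join(words)
-- ===== Notes on version B (the rewrite author's own statement) =====
-- stated objective: simpler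
-- what changed: A makes three passes (builds a sanitized intermediate string, then splits it on whitespace, then capitalizes/joins/strips); B does a single pass over the input with a current-word buffer and a result word list, flushing the capitalized buffer at separators, so no intermediate string, no split and no strip are needed.
import Mathlib
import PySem

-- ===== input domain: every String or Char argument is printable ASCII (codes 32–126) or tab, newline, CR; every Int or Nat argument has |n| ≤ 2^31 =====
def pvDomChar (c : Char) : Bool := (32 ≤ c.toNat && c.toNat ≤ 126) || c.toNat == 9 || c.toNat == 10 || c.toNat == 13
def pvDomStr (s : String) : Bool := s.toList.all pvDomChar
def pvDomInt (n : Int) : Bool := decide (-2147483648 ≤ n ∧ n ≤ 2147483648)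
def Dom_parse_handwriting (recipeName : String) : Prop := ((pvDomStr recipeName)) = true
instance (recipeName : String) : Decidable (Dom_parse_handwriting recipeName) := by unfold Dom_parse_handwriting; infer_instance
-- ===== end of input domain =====

-- B replaces A's three passes (sanitize into an intermediate string, split it, capitalize/join/strip)
-- by one pass with a word buffer and a result list; objective: simpler (single traversal, no intermediate string).

-- str.capitalize() on ASCII: first char uppercased, the rest lowercased (both Pythons call it)
def pyCapitalize (w : List Char) : List Char :=
  match w with
  | [] => []
  | c :: rest => PySem.Chars.upperChar c :: rest.map PySem.Chars.lowerChar

-- ===== PORT A =====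
def parse_handwriting (recipeName : String) : Option String :=
  if PySem.Str.len recipeName == 0 then none
  else
    let parsedRecipeName := recipeName.toList.foldl (fun acc c =>
      let acc := if PySem.Chars.isalpha c || c == ' ' then acc ++ [c] else acc
      if c == '_' || c == '-' then acc ++ [' '] else acc) []
    let final := (PySem.Chars.split₀ parsedRecipeName).foldl
      (fun acc w => acc ++ pyCapitalize w ++ [' ']) []
    let final := PySem.Chars.strip final
    if final.length == 0 then none else some (String.ofList final)

-- ===== PORT B =====
def bFlush (buf : List Char) (res : List (List Char)) : List (List Char) :=
  if buf.isEmpty then res else res ++ [pyCapitalize buf]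

def bLoop : List Char → List Char → List (List Char) → List (List Char)
  | [], buf, res => bFlush buf res
  | c :: cs, buf, res =>
    if PySem.Chars.isalpha c then bLoop cs (buf ++ [c]) res
    else if c == ' ' || c == '_' || c == '-' then bLoop cs [] (bFlush buf res)
    else bLoop cs buf res

def parse_handwriting_alt (recipeName : String) : Option String :=
  let words := bLoop recipeName.toList [] []
  if words.isEmpty then none
  else some (String.ofList (PySem.Chars.join [' '] words))

-- ===== PRECONDITION & SPEC =====
def Spec_parse_handwriting (recipeName : String) (out : Option String) : Prop := out = parse_handwriting_alt recipeName
instance (recipeName : String) (out : Option String) : Decidable (Spec_parse_handwriting recipeName out) := by unfold Spec_parse_handwriting; infer_instance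

-- ===== CLAIM (what is proved, stated in full; the proofs are below) =====
def Claim_equal_parse_handwriting : Prop := ∀ (recipeName : String), Dom_parse_handwriting recipeName → Spec_parse_handwriting recipeName (parse_handwriting recipeName)

-- ===== LEMMAS AND PROOFS =====

theorem charLe_toNat {a b : Char} (h : a ≤ b) : a.toNat ≤ b.toNat :=
  UInt32.le_iff_toNat_le.mp (Char.le_def.mp h)
theorem islower_bounds (c : Char) (h : PySem.Chars.islower c = true) : 97 ≤ c.toNat ∧ c.toNat ≤ 122 := by
  unfold PySem.Chars.islower at h
  simp only [Bool.and_eq_true, decide_eq_true_eq] at h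
  exact ⟨charLe_toNat h.1, charLe_toNat h.2⟩
theorem isupper_bounds (c : Char) (h : PySem.Chars.isupper c = true) : 65 ≤ c.toNat ∧ c.toNat ≤ 90 := by
  unfold PySem.Chars.isupper at h
  simp only [Bool.and_eq_true, decide_eq_true_eq] at h
  exact ⟨charLe_toNat h.1, charLe_toNat h.2⟩
theorem notspace_of_bounds (c : Char) (h1 : 33 ≤ c.toNat) (h2 : c.toNat ≤ 127) : PySem.Chars.isspace c = false := by
  unfold PySem.Chars.isspace
  simp only [Bool.or_eq_false_iff, Bool.and_eq_false_iff, decide_eq_false_iff_not]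
  omega
theorem alpha_not_space (c : Char) (h : PySem.Chars.isalpha c = true) : PySem.Chars.isspace c = false := by
  unfold PySem.Chars.isalpha at h
  rcases Bool.or_eq_true _ _ |>.mp h with h | h
  · have := isupper_bounds c h; exact notspace_of_bounds c (by omega) (by omega)
  · have := islower_bounds c h; exact notspace_of_bounds c (by omega) (by omega)
theorem upper_not_space (c : Char) (h : PySem.Chars.isspace c = false) :
    PySem.Chars.isspace (PySem.Chars.upperChar c) = false := by
  unfold PySem.Chars.upperChar
  split_ifs with hl
  · have hb := islower_bounds c hl
    have hv : (Char.ofNat (c.toNat - 32)).toNat = c.toNat - 32 := by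
      rw [Char.toNat_ofNat]
      have hval : (c.toNat - 32).isValidChar := by
        unfold Nat.isValidChar; left; omega
      simp [hval]
    exact notspace_of_bounds _ (by omega) (by omega)
  · exact h
theorem lower_not_space (c : Char) (h : PySem.Chars.isspace c = false) :
    PySem.Chars.isspace (PySem.Chars.lowerChar c) = false := by
  unfold PySem.Chars.lowerChar
  split_ifs with hu
  · have hb := isupper_bounds c hu
    have hv : (Char.ofNat (c.toNat + 32)).toNat = c.toNat + 32 := by
      rw [Char.toNat_ofNat]
      have hval : (c.toNat + 32).isValidChar := by
        unfold Nat.isValidChar; left; omega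
      simp [hval]
    exact notspace_of_bounds _ (by omega) (by omega)
  · exact h

def fA (c : Char) : Option Char :=
  if PySem.Chars.isalpha c || c == ' ' then some c
  else if c == '_' || c == '-' then some ' ' else none

theorem cap_ne_nil (w : List Char) (h : w ≠ []) : pyCapitalize w ≠ [] := by
  cases w with
  | nil => exact absurd rfl h
  | cons c r => simp [pyCapitalize]

theorem cap_not_space (w : List Char) (h : ∀ c ∈ w, PySem.Chars.isspace c = false) :
    ∀ c ∈ pyCapitalize w, PySem.Chars.isspace c = false := by
  cases w with
  | nil => simp [pyCapitalize]
  | cons c r =>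
    intro d hd
    simp only [pyCapitalize, List.mem_cons, List.mem_map] at hd
    rcases hd with hd | ⟨e, he, hd⟩
    · exact hd ▸ upper_not_space c (h c (by simp))
    · exact hd ▸ lower_not_space e (h e (by simp [he]))

theorem foldlA_eq (cs : List Char) : ∀ acc : List Char,
    cs.foldl (fun acc c =>
      let acc := if PySem.Chars.isalpha c || c == ' ' then acc ++ [c] else acc
      if c == '_' || c == '-' then acc ++ [' '] else acc) acc
    = acc ++ cs.filterMap fA := by
  induction cs with
  | nil => simp
  | cons c cs ih =>
    intro acc
    by_cases h1 : (PySem.Chars.isalpha c || c == ' ') = true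
    · have h2 : (c == '_' || c == '-') = false := by
        rcases Bool.or_eq_true _ _ |>.mp h1 with ha | hc
        · simp only [Bool.or_eq_false_iff, beq_eq_false_iff_ne]
          constructor <;> rintro rfl <;> revert ha <;> decide
        · have : c = ' ' := by simpa using hc
          subst this; decide
      have hf : fA c = some c := by simp [fA, h1]
      simp only [List.foldl_cons, h1, if_true, h2, if_false, List.filterMap_cons, hf, ih]
      simp
    · by_cases h2 : (c == '_' || c == '-') = true
      · have hf : fA c = some ' ' := by simp [fA, h1, h2]
        simp only [List.foldl_cons, h1, if_false, h2, if_true, List.filterMap_cons, hf, ih]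
        simp
      · have hf : fA c = none := by simp [fA, h1, h2]
        simp only [List.foldl_cons, h1, if_false, h2, List.filterMap_cons, hf, ih]
        simp

theorem go_acc (s : List Char) : ∀ cur acc,
    PySem.Chars.split₀.go s cur acc = acc.reverse ++ PySem.Chars.split₀.go s cur [] := by
  induction s with
  | nil =>
    intro cur acc
    simp only [PySem.Chars.split₀.go]
    by_cases h : cur.isEmpty = true <;> simp [h]
  | cons c s ih =>
    intro cur acc
    by_cases hsp : PySem.Chars.isspace c = true
    · by_cases hcur : cur.isEmpty = true
      · simp only [PySem.Chars.split₀.go, hsp, hcur, if_true]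
        exact ih [] acc
      · simp only [PySem.Chars.split₀.go, hsp, hcur, if_true, if_false]
        rw [ih [] (cur.reverse :: acc), ih [] [cur.reverse]]
        simp
    · simp only [PySem.Chars.split₀.go, hsp, if_false, Bool.false_eq_true]
      exact ih (c :: cur) acc

theorem bLoop_eq (cs : List Char) : ∀ (buf : List Char) (res : List (List Char)),
    bLoop cs buf res
      = res ++ (PySem.Chars.split₀.go (cs.filterMap fA) buf.reverse []).map pyCapitalize := by
  induction cs with
  | nil =>
    intro buf res
    simp only [bLoop, List.filterMap_nil, PySem.Chars.split₀.go, bFlush]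
    by_cases hb : buf.isEmpty = true
    · simp [hb, List.isEmpty_iff.mp hb]
    · have : buf.reverse.isEmpty = false := by
        simp_all [List.isEmpty_iff]
      simp [hb, this]
  | cons c cs ih =>
    intro buf res
    by_cases ha : PySem.Chars.isalpha c = true
    · have hsp : PySem.Chars.isspace c = false := alpha_not_space c ha
      have hf : fA c = some c := by simp [fA, ha]
      simp only [bLoop, ha, if_true, List.filterMap_cons, hf]
      rw [ih (buf ++ [c]) res]
      simp only [PySem.Chars.split₀.go, hsp, Bool.false_eq_true, if_false, List.reverse_append,
        List.reverse_singleton, List.singleton_append]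
    · by_cases hs : (c == ' ' || c == '_' || c == '-') = true
      · have hf : fA c = some ' ' := by
          have : (c = ' ' ∨ c = '_') ∨ c = '-' := by simpa using hs
          rcases this with (rfl | rfl) | rfl <;> simp [fA] <;> rfl
        have hsp : PySem.Chars.isspace ' ' = true := by decide
        simp only [bLoop, ha, Bool.false_eq_true, if_false, hs, if_true, List.filterMap_cons, hf]
        rw [ih [] (bFlush buf res)]
        by_cases hb : buf.isEmpty = true
        · have hb' : buf.reverse.isEmpty = true := by simp_all [List.isEmpty_iff]
          simp only [PySem.Chars.split₀.go, hsp, if_true, hb', bFlush, hb, List.reverse_nil,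
            if_true]
        · have hb' : buf.reverse.isEmpty = false := by simp_all [List.isEmpty_iff]
          simp only [PySem.Chars.split₀.go, hsp, if_true, hb', Bool.false_eq_true, if_false,
            bFlush, hb]
          rw [go_acc (cs.filterMap fA) [] [buf.reverse.reverse]]
          simp
      · have hf : fA c = none := by
          have hns : (¬c = ' ' ∧ ¬c = '_') ∧ ¬c = '-' := by simpa using hs
          simp [fA, ha, hns.1.1, hns.1.2, hns.2]
        simp only [bLoop, ha, Bool.false_eq_true, if_false, hs, List.filterMap_cons, hf]
        exact ih buf res

theorem go_words (s : List Char) : ∀ (cur : List Char) (acc : List (List Char)),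
    (∀ w ∈ acc, w ≠ [] ∧ ∀ c ∈ w, PySem.Chars.isspace c = false) →
    (∀ c ∈ cur, PySem.Chars.isspace c = false) →
    ∀ w ∈ PySem.Chars.split₀.go s cur acc, w ≠ [] ∧ ∀ c ∈ w, PySem.Chars.isspace c = false := by
  induction s with
  | nil =>
    intro cur acc hacc hcur
    simp only [PySem.Chars.split₀.go]
    by_cases hc : cur.isEmpty = true
    · simp only [hc, if_true, List.mem_reverse]
      exact hacc
    · simp only [hc, Bool.false_eq_true, if_false, List.mem_reverse, List.mem_cons]
      rintro w (rfl | hw)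
      · exact ⟨by simp_all [List.isEmpty_iff], fun c hc => hcur c (List.mem_reverse.mp hc)⟩
      · exact hacc w hw
  | cons c s ih =>
    intro cur acc hacc hcur
    by_cases hsp : PySem.Chars.isspace c = true
    · by_cases hc : cur.isEmpty = true
      · simp only [PySem.Chars.split₀.go, hsp, if_true, hc]
        exact ih [] acc hacc (by simp)
      · simp only [PySem.Chars.split₀.go, hsp, if_true, hc, Bool.false_eq_true, if_false]
        refine ih [] (cur.reverse :: acc) ?_ (by simp)
        intro w hw'
        rcases List.mem_cons.mp hw' with rfl | hw
        · exact ⟨by simp_all [List.isEmpty_iff], fun d hd => hcur d (List.mem_reverse.mp hd)⟩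
        · exact hacc w hw
    · simp only [PySem.Chars.split₀.go, hsp, Bool.false_eq_true, if_false]
      refine ih (c :: cur) acc hacc ?_
      intro d hd'
      rcases List.mem_cons.mp hd' with rfl | hd
      · simpa using hsp
      · exact hcur d hd

theorem rstrip_append_space (xs : List Char) :
    PySem.Chars.rstrip (xs ++ [' ']) = PySem.Chars.rstrip xs := by
  unfold PySem.Chars.rstrip
  rw [List.reverse_append]
  simp [List.dropWhile_cons, show PySem.Chars.isspace ' ' = true by decide]

theorem rstrip_all (xs : List Char) (h : ∀ c ∈ xs, PySem.Chars.isspace c = false) :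
    PySem.Chars.rstrip xs = xs := by
  unfold PySem.Chars.rstrip
  rw [List.dropWhile_eq_self_iff.mpr, List.reverse_reverse]
  intro hl
  have hmem : xs.reverse[0] ∈ xs := List.mem_reverse.mp (List.getElem_mem hl)
  simp only [h _ hmem, Bool.false_eq_true, not_false_eq_true]

theorem rstrip_append (a b : List Char) (h : PySem.Chars.rstrip b ≠ []) :
    PySem.Chars.rstrip (a ++ b) = a ++ PySem.Chars.rstrip b := by
  unfold PySem.Chars.rstrip at *
  rw [List.reverse_append, List.dropWhile_append]
  have hne : (List.dropWhile PySem.Chars.isspace b.reverse).isEmpty = false := by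
    rcases hd : List.dropWhile PySem.Chars.isspace b.reverse with _ | ⟨x, xs⟩
    · rw [hd] at h; simp at h
    · simp
  simp [hne]

theorem lstrip_cons (c : Char) (xs : List Char) (h : PySem.Chars.isspace c = false) :
    PySem.Chars.lstrip (c :: xs) = c :: xs := by
  unfold PySem.Chars.lstrip
  simp [List.dropWhile_cons, h]

theorem join_ne_nil (caps : List (List Char)) (hne : caps ≠ [])
    (h : ∀ w ∈ caps, w ≠ []) :
    PySem.Chars.join [' '] caps ≠ [] := by
  match caps with
  | [] => exact absurd rfl hne
  | [w] => rw [PySem.Chars.join_singleton]; exact h w (by simp)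
  | w :: w' :: rest =>
    rw [PySem.Chars.join_cons_cons]
    have := h w (by simp)
    intro hc
    simp [List.append_eq_nil_iff, this] at hc

theorem rstrip_flat (caps : List (List Char)) (hne : caps ≠ [])
    (h : ∀ w ∈ caps, w ≠ [] ∧ ∀ c ∈ w, PySem.Chars.isspace c = false) :
    PySem.Chars.rstrip ((caps.map (fun w => w ++ [' '])).flatten) = PySem.Chars.join [' '] caps := by
  match caps with
  | [] => exact absurd rfl hne
  | [w] =>
    simp only [List.map_cons, List.map_nil, List.flatten_cons, List.flatten_nil, List.append_nil]
    rw [rstrip_append_space, rstrip_all w (h w (by simp)).2, PySem.Chars.join_singleton]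
  | w :: w' :: rest =>
    have ih := rstrip_flat (w' :: rest) (by simp)
      (fun v hv => h v (List.mem_cons_of_mem _ hv))
    have hjoin_ne : PySem.Chars.rstrip (((w' :: rest).map (fun w => w ++ [' '])).flatten) ≠ [] := by
      rw [ih]
      exact join_ne_nil _ (by simp) (fun v hv => (h v (List.mem_cons_of_mem _ hv)).1)
    calc PySem.Chars.rstrip (((w :: w' :: rest).map (fun w => w ++ [' '])).flatten)
        = PySem.Chars.rstrip ((w ++ [' ']) ++ ((w' :: rest).map (fun w => w ++ [' '])).flatten) := by
          simp
      _ = (w ++ [' ']) ++ PySem.Chars.rstrip (((w' :: rest).map (fun w => w ++ [' '])).flatten) :=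
          rstrip_append _ _ hjoin_ne
      _ = (w ++ [' ']) ++ PySem.Chars.join [' '] (w' :: rest) := by rw [ih]
      _ = PySem.Chars.join [' '] (w :: w' :: rest) := by
          rw [PySem.Chars.join_cons_cons]

theorem strip_flat (caps : List (List Char)) (hne : caps ≠ [])
    (h : ∀ w ∈ caps, w ≠ [] ∧ ∀ c ∈ w, PySem.Chars.isspace c = false) :
    PySem.Chars.strip ((caps.map (fun w => w ++ [' '])).flatten) = PySem.Chars.join [' '] caps := by
  unfold PySem.Chars.strip
  match caps with
  | [] => exact absurd rfl hne
  | w :: rest =>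
    obtain ⟨hwne, hwns⟩ := h w (by simp)
    match w, hwne with
    | c :: t, _ =>
      have hls : PySem.Chars.lstrip ((((c :: t) :: rest).map (fun w => w ++ [' '])).flatten)
          = (((c :: t) :: rest).map (fun w => w ++ [' '])).flatten := by
        simp only [List.map_cons, List.flatten_cons, List.cons_append]
        exact lstrip_cons c _ (hwns c (by simp))
      rw [hls]
      exact rstrip_flat _ (by simp) h

theorem foldl_apfun (ws : List (List Char)) : ∀ acc : List Char,
    ws.foldl (fun acc w => acc ++ pyCapitalize w ++ [' ']) acc
      = acc ++ ((ws.map pyCapitalize).map (fun w => w ++ [' '])).flatten := by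
  induction ws with
  | nil => simp
  | cons w ws ih =>
    intro acc
    simp only [List.foldl_cons, ih, List.map_cons, List.flatten_cons]
    simp

theorem parse_agree (s : String) : parse_handwriting s = parse_handwriting_alt s := by
  unfold parse_handwriting parse_handwriting_alt
  by_cases hcs : s.toList = []
  · simp [PySem.Str.len, PySem.Chars.len, hcs, bLoop, bFlush]
  · have hlen0 : PySem.Str.len s = (s.toList.length : Int) := by simp [pysem]
    have hlen : (PySem.Str.len s == 0) = false := by
      rw [hlen0]
      simp only [beq_eq_false_iff_ne, ne_eq, Int.natCast_eq_zero, List.length_eq_zero_iff]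
      exact hcs
    rw [hlen]
    simp only [Bool.false_eq_true, if_false, foldlA_eq, List.nil_append]
    rw [bLoop_eq s.toList [] []]
    unfold PySem.Chars.split₀
    have hws : ∀ w ∈ PySem.Chars.split₀.go (s.toList.filterMap fA) [] [],
        w ≠ [] ∧ ∀ c ∈ w, PySem.Chars.isspace c = false :=
      go_words _ [] [] (by simp) (by simp)
    simp only [List.reverse_nil]
    generalize hwsdef : PySem.Chars.split₀.go (s.toList.filterMap fA) [] [] = ws at hws ⊢
    rw [foldl_apfun ws []]
    simp only [List.nil_append]
    by_cases hw : ws = []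
    · simp [hw, PySem.Chars.strip, PySem.Chars.lstrip, PySem.Chars.rstrip]
    · have hcaps : ∀ w ∈ ws.map pyCapitalize, w ≠ [] ∧ ∀ c ∈ w, PySem.Chars.isspace c = false := by
        intro w hw'
        obtain ⟨v, hv, rfl⟩ := List.mem_map.mp hw'
        exact ⟨cap_ne_nil v (hws v hv).1, cap_not_space v (hws v hv).2⟩
      have hcne : ws.map pyCapitalize ≠ [] := by simpa using hw
      rw [strip_flat _ hcne hcaps]
      have hjne := join_ne_nil _ hcne (fun v hv => (hcaps v hv).1)
      have h1 : ((PySem.Chars.join [' '] (ws.map pyCapitalize)).length == 0) = false := by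
        simp [List.length_eq_zero_iff, hjne]
      have h2 : (ws.map pyCapitalize).isEmpty = false := by
        simp [List.isEmpty_iff, hw]
      rw [h1, h2]

-- ===== VERDICT (by name: the statement is the Claim_ definition above) =====
theorem parse_handwriting_spec : Claim_equal_parse_handwriting := by
  intro recipeName _
  unfold Spec_parse_handwriting
  exact parse_agree recipeName
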